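-- pv_equiv track=rewrite | github.com/lebedev2k/leetcode | 2451. Odd String Difference.py | oddString
-- ===== SOURCE A (Python) =====
-- def oddString(words: list[str]) -> str:
--     from collections import defaultdict
--     d = defaultdict(list)
--     for i, word in enumerate(words):
--         a = '#'.join([str(ord(word[j+1])-ord(word[j])) for j in range(len(word)-1)])
--         d[a].append(i)
--
--     for v in d.values():
--         if len(v)==1:
--             return words[v[0]]
-- ===== SOURCE B (Python) =====
-- def oddString(words: list[str]) -> str:
--     sigs = ['#'.join(str(ord(w[j + 1]) - ord(w[j])) for j in range(len(w) - 1))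
--             for w in words]
--     order = sorted(range(len(words)), key=lambda i: sigs[i])
--     uniq = []
--     k = 0
--     n = len(order)
--     while k < n:
--         m = k + 1
--         while m < n and sigs[order[m]] == sigs[order[k]]:
--             m += 1
--         if m == k + 1:
--             uniq.append(order[k])
--         k = m
--     return words[min(uniq)] if uniq else None
-- ===== Notes on version B (the rewrite author's own statement) =====
-- stated objective: alternative
-- what changed: B replaces A's defaultdict grouping by a sort-based algorithm: it sorts the indices by their '#'-joined difference signature, scans the sorted order once detecting runs of equal signatures, collects the indices of singleton runs and returns the word at the minimal such index (which equals A's first-unique-signature choice); no dict is built.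
-- outside the precondition, e.g. on oddString(['ab', 'ab']): A returns None, B returns None
import Mathlib
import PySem

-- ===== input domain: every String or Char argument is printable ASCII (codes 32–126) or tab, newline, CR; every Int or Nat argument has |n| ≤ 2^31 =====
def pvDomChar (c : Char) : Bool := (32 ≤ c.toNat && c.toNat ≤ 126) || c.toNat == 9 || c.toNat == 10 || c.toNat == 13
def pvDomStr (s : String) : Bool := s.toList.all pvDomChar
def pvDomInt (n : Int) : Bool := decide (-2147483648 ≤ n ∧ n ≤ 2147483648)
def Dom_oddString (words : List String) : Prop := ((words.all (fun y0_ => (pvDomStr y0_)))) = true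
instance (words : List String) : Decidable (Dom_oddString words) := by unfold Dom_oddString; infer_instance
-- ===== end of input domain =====

-- B replaces A's defaultdict grouping by sort-indices-by-signature, adjacent-run scan for
-- singletons and min-index selection (objective: alternative algorithm, not faster).


-- ===== PORT A =====
-- the '#'.join signature both Pythons compute with the identical expression
def pySig (word : String) : String :=
  PySem.Str.join "#" ((PySem.List.pyRange 0 (PySem.Str.len word - 1) 1).map
    (fun j => PySem.Int.toStr (((PySem.List.pyGetD word.toList (j + 1) ' ').toNat : Int)
                               - ((PySem.List.pyGetD word.toList j ' ').toNat : Int))))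

-- 'for v in d.values(): if len(v)==1: return words[v[0]]'
def oddAValues (words : List String) : List (List Int) → String
  | [] => ""
  | v :: rest =>
    if v.length == 1 then
      (PySem.List.pyGet? words ((PySem.List.pyGet? v 0).getD 0)).getD ""
    else oddAValues words rest

def oddString (words : List String) : String :=
  let d := (PySem.List.enumerate words).foldl
    (fun d p => d.modify (pySig p.2) [] (fun l => l ++ [p.1])) PySem.Dict.empty
  oddAValues words d.values

-- ===== PORT B =====
-- the grouping scan: 'while k < n: m = k+1; while m < n and sigs[order[m]] == sigs[order[k]]: m += 1; …'
-- the inner index-advancing while is ported exactly as takeWhile/dropWhile of the remaining suffix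
def groupUniq (sigs : List String) : List Int → List Int
  | [] => []
  | i :: rest =>
    let s := PySem.List.pyGetD sigs i ""
    let rest' := rest.dropWhile (fun j => PySem.List.pyGetD sigs j "" == s)
    if (rest.takeWhile (fun j => PySem.List.pyGetD sigs j "" == s)).isEmpty then
      i :: groupUniq sigs rest'
    else groupUniq sigs rest'
  termination_by l => l.length
  decreasing_by
    all_goals simp only [List.length_cons]
    all_goals exact Nat.lt_succ_of_le (List.length_dropWhile_le _ _)

def oddString_alt (words : List String) : String :=
  let sigs := words.map pySig
  let order := PySem.List.sorted (PySem.List.pyRange 0 sigs.length 1)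
    (fun i => PySem.List.pyGetD sigs i "") false
  let uniq := groupUniq sigs order
  match PySem.List.min? uniq (fun i => i) with
  | some i => (PySem.List.pyGet? words i).getD ""
  | none => ""

-- ===== PRECONDITION & SPEC =====
-- Pre_ excludes inputs on which NO word has a unique difference signature: there the Python A
-- (and B) falls off the loop and returns None, which is not a value of the declared str type.
def Pre_oddString (words : List String) : Prop :=
  ((words.map pySig).any (fun s => (words.map pySig).count s == 1)) = true
instance (words : List String) : Decidable (Pre_oddString words) := by
  unfold Pre_oddString; infer_instance

def pvWitness_oddString : List String := ["ab", "ab", "ac"]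

def Spec_oddString (words : List String) (out : String) : Prop := out = oddString_alt words
instance (words : List String) (out : String) : Decidable (Spec_oddString words out) := by
  unfold Spec_oddString; infer_instance

-- ===== CLAIM (what is proved, stated in full; the proofs are below) =====
def Claim_equal_oddString : Prop :=
  ∀ (words : List String), Dom_oddString words → Pre_oddString words →
    Spec_oddString words (oddString words)

-- ===== LEMMAS AND PROOFS =====

-- the common specification both ports are reduced to:
-- the word at the first index whose signature occurs exactly once
def pvFirstUniq (words : List String) : String :=
  ((PySem.List.enumerate (words.map pySig)).find?
      (fun p => (words.map pySig).count p.2 == 1)).elim ""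
    (fun p => (PySem.List.pyGet? words p.1).getD "")

theorem oddAValues_eq (words : List String) (vs : List (List Int)) :
    oddAValues words vs =
      (vs.find? (fun v => v.length == 1)).elim ""
        (fun v => (PySem.List.pyGet? words ((PySem.List.pyGet? v 0).getD 0)).getD "") := by
  induction vs with
  | nil => rfl
  | cons v rest ih =>
    by_cases h : (v.length == 1) = true
    · simp [oddAValues, h]
    · simp only [Bool.not_eq_true] at h
      simp [oddAValues, h, ih]

-- PySem.Set.add only ever extends the accumulator, so a found element stays found
theorem find?_foldl_add_some {α : Type} [BEq α] [LawfulBEq α] (p : α → Bool) :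
    ∀ (xs acc : List α) (v : α), acc.find? p = some v →
      ((xs.foldl PySem.Set.add acc).find? p) = some v := by
  intro xs
  induction xs with
  | nil => intro acc v h; simpa using h
  | cons x xs ih =>
    intro acc v h
    simp only [List.foldl_cons]
    apply ih
    unfold PySem.Set.add
    split
    · exact h
    · simp [List.find?_append, h]

theorem find?_foldl_add_none {α : Type} [BEq α] [LawfulBEq α] (p : α → Bool) :
    ∀ (xs acc : List α), acc.find? p = none →
      ((xs.foldl PySem.Set.add acc).find? p) = xs.find? p := by
  intro xs
  induction xs with
  | nil => intro acc h; simpa using h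
  | cons x xs ih =>
    intro acc h
    simp only [List.foldl_cons]
    by_cases hx : p x = true
    · have hnx : ¬ x ∈ acc := by
        intro hmem
        have := List.find?_eq_none.mp h x hmem
        simp [hx] at this
      have hadd : PySem.Set.add acc x = acc ++ [x] := by
        unfold PySem.Set.add
        simp [hnx]
      rw [hadd]
      have hfound : (acc ++ [x]).find? p = some x := by
        simp [List.find?_append, h, hx]
      rw [find?_foldl_add_some p xs (acc ++ [x]) x hfound]
      simp [hx]
    · simp only [Bool.not_eq_true] at hx
      have : (PySem.Set.add acc x).find? p = none := by
        unfold PySem.Set.add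
        split
        · exact h
        · simp [List.find?_append, h, hx]
      rw [ih _ this]
      simp [hx]

theorem find?_dedup {α : Type} [BEq α] [LawfulBEq α] (p : α → Bool) (xs : List α) :
    (PySem.List.dedup xs).find? p = xs.find? p := by
  unfold PySem.List.dedup PySem.Set.ofList
  exact find?_foldl_add_none p xs PySem.Set.empty rfl

theorem enumerate_map {α β : Type} (f : α → β) :
    ∀ (xs : List α) (s : Int),
      PySem.List.enumerate (xs.map f) s =
        (PySem.List.enumerate xs s).map (fun p => (p.1, f p.2)) := by
  intro xs
  induction xs with
  | nil => intro s; simp [PySem.List.enumerate_nil]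
  | cons x xs ih => intro s; simp [PySem.List.enumerate_cons, ih]

-- first pair whose snd satisfies q = first pair whose snd equals the first q-satisfying snd
theorem find?_pairs {β : Type} [BEq β] [LawfulBEq β] (q : β → Bool) :
    ∀ (es : List (Int × β)),
      es.find? (fun p => q p.2) =
        ((es.map (fun p => p.2)).find? q).bind
          (fun k => (es.filter (fun p => p.2 == k)).head?) := by
  intro es
  induction es with
  | nil => rfl
  | cons a es ih =>
    by_cases hqa : q a.2 = true
    · simp [hqa, List.filter_cons]
    · simp only [Bool.not_eq_true] at hqa
      simp only [List.map_cons, List.find?_cons, hqa]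
      rw [ih]
      cases h : (es.map (fun p => p.2)).find? q with
      | none => simp
      | some k =>
        have hk : q k = true := List.find?_some h
        have hne : (a.2 == k) = false := by
          rcases hbeq : a.2 == k with _ | _
          · rfl
          · exact absurd hk (by rw [← eq_of_beq hbeq, hqa]; simp)
        simp [List.filter_cons, hne]

-- A computes the word at the first index whose signature is unique
theorem oddString_eq_firstUniq (words : List String) :
    oddString words = pvFirstUniq words := by
  unfold oddString pvFirstUniq
  simp only []
  set sigs := words.map pySig with hsigs
  set lm : List (String × Int) :=
    (PySem.List.enumerate words).map (fun p => (pySig p.2, p.1)) with hlm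
  have hfold :
      (PySem.List.enumerate words).foldl
        (fun d p => d.modify (pySig p.2) [] (fun l => l ++ [p.1])) PySem.Dict.empty
      = lm.foldl (fun d p => d.modify p.1 [] (fun l => l ++ [p.2])) PySem.Dict.empty := by
    rw [hlm, List.foldl_map]
  rw [hfold]
  set d := lm.foldl (fun d p => d.modify p.1 [] (fun l => l ++ [p.2])) PySem.Dict.empty with hd
  have hkeys : d.keys = PySem.List.dedup sigs := by
    rw [hd]
    have := PySem.Dict.keys_foldl_modify_key (l := lm) (key := fun p => p.1)
      (d0 := ([] : List Int)) (f := fun _ p => fun l => l ++ [p.2]) (d := PySem.Dict.empty)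
    simp only at this
    rw [this]
    have hmap : lm.map (fun p => p.1) = sigs := by
      rw [hlm, List.map_map, hsigs]
      have : (PySem.List.enumerate words).map ((fun p => p.1) ∘ (fun p => (pySig p.2, p.1)))
          = (PySem.List.enumerate words).map (fun p => pySig p.2) := rfl
      rw [this]
      have : (PySem.List.enumerate words).map (fun p => pySig p.2)
          = ((PySem.List.enumerate words).map (fun p => p.2)).map pySig := by
        rw [List.map_map]; rfl
      rw [this, PySem.List.map_snd_enumerate]
    rw [hmap]
    rfl
  have hnodup : d.keys.Nodup := by
    rw [hd]
    exact PySem.Dict.nodup_keys_foldl_modify_key lm (fun p => p.1) []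
      (fun _ p => fun l => l ++ [p.2]) PySem.Dict.empty (by simp)
  have hvals : d.values = d.keys.map (fun k => d.getD k []) :=
    PySem.Dict.values_eq_map_keys d hnodup []
  have hgetD : ∀ k, d.getD k [] = (lm.filter (fun p => p.1 == k)).map (fun p => p.2) := by
    intro k
    rw [hd, PySem.Dict.getD_foldl_modify_append]
    simp
  have hlm2 : lm = (PySem.List.enumerate sigs).map (fun p => (p.2, p.1)) := by
    rw [hsigs, enumerate_map, List.map_map, hlm]
    rfl
  have hcount : ∀ k, (lm.filter (fun p => p.1 == k)).length = sigs.count k := by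
    intro k
    rw [← List.countP_eq_length_filter, hlm2, List.countP_map]
    have h1 : (PySem.List.enumerate sigs).countP
        ((fun p => p.1 == k) ∘ (fun p : Int × String => (p.2, p.1)))
        = (PySem.List.enumerate sigs).countP ((fun s => s == k) ∘ (fun p => p.2)) := rfl
    rw [h1, ← List.countP_map, PySem.List.map_snd_enumerate, List.count]
  rw [hvals, hkeys, oddAValues_eq, List.find?_map]
  have hpred : ((fun v : List Int => v.length == 1) ∘ fun k => d.getD k [])
      = (fun s => sigs.count s == 1) := by
    funext k
    simp only [Function.comp, hgetD k, List.length_map, hcount k]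
  rw [hpred, find?_dedup]
  have hB := find?_pairs (fun s => sigs.count s == 1) (PySem.List.enumerate sigs)
  rw [PySem.List.map_snd_enumerate] at hB
  rw [hB]
  cases hfq : sigs.find? (fun s => sigs.count s == 1) with
  | none => simp
  | some k =>
    have hcnt : sigs.count k = 1 := by
      have hk := List.find?_some hfq
      simpa using hk
    have hlen : ((PySem.List.enumerate sigs).filter (fun p => p.2 == k)).length = 1 := by
      have : ((PySem.List.enumerate sigs).filter (fun p => p.2 == k)).length
          = (lm.filter (fun p => p.1 == k)).length := by
        rw [hlm2, List.filter_map]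
        simp only [List.length_map]
        rfl
      rw [this, hcount k, hcnt]
    obtain ⟨p0, hp0⟩ := List.length_eq_one_iff.mp hlen
    have hfilt : lm.filter (fun p => p.1 == k) = [(p0.2, p0.1)] := by
      rw [hlm2, List.filter_map]
      have : (PySem.List.enumerate sigs).filter
          ((fun p => p.1 == k) ∘ (fun p : Int × String => (p.2, p.1)))
          = (PySem.List.enumerate sigs).filter (fun p => p.2 == k) := rfl
      rw [this, hp0]
      rfl
    have hfind : List.find? (fun p => p.2 == k) (PySem.List.enumerate sigs) = some p0 := by
      rw [← List.head?_filter, hp0]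
      rfl
    simp [hgetD, hfilt, hfind, PySem.List.pyGet?, PySem.List.pyIdx?]

-- in a key-sorted cons, every kept tail element strictly exceeds the head's key
theorem dropWhile_key_lt (key : Int → String) (i : Int) (rest : List Int)
    (hp : (i :: rest).Pairwise (fun a b => key a ≤ key b)) :
    ∀ j ∈ rest.dropWhile (fun j => key j == key i), key i < key j := by
  cases hdw : rest.dropWhile (fun j => key j == key i) with
  | nil => intro j hj; cases hj
  | cons j0 t =>
    have hne : rest.dropWhile (fun j => key j == key i) ≠ [] := by rw [hdw]; simp
    have hj0false := List.head_dropWhile_not (fun j => key j == key i) hne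
    rw [show (rest.dropWhile (fun j => key j == key i)).head hne = j0 by
      simp only [hdw, List.head_cons]] at hj0false
    have hj0mem : j0 ∈ rest :=
      List.Sublist.mem (by rw [hdw]; exact List.mem_cons_self)
        (List.dropWhile_sublist _)
    have hij0 : key i < key j0 := by
      have hle : key i ≤ key j0 := List.rel_of_pairwise_cons hp hj0mem
      have hneq : key j0 ≠ key i := by simpa using hj0false
      exact lt_of_le_of_ne hle (fun hc => hneq hc.symm)
    have hpair' : (j0 :: t).Pairwise (fun a b => key a ≤ key b) := by
      rw [← hdw]
      exact List.Pairwise.sublist (List.dropWhile_sublist _) hp.tail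
    intro j hj
    rcases List.mem_cons.mp hj with h1 | h1
    · rw [h1]; exact hij0
    · exact lt_of_lt_of_le hij0 (List.rel_of_pairwise_cons hpair' h1)

-- the uniqueness filter on a key-sorted cons splits along takeWhile/dropWhile
theorem filter_uniq_cons (key : Int → String) (i : Int) (rest : List Int)
    (hp : (i :: rest).Pairwise (fun a b => key a ≤ key b)) :
    (i :: rest).filter (fun i' => (i :: rest).countP (fun j => key j == key i') == 1)
      = (if (rest.takeWhile (fun j => key j == key i)).isEmpty then [i] else [])
        ++ ((rest.dropWhile (fun j => key j == key i)).filter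
             (fun i' => (rest.dropWhile (fun j => key j == key i)).countP
               (fun j => key j == key i') == 1)) := by
  set p : Int → Bool := fun j => key j == key i with hpdef
  set same := rest.takeWhile p with hsame0
  set rest' := rest.dropWhile p with hrest0
  have hsplit : same ++ rest' = rest := List.takeWhile_append_dropWhile
  have hsamekey : ∀ j ∈ same, key j = key i := by
    intro j hj
    have := List.mem_takeWhile_imp (hsame0 ▸ hj)
    simpa [hpdef] using this
  have hlt : ∀ j ∈ rest', key i < key j := dropWhile_key_lt key i rest hp
  have hcnt_same : same.countP (fun j => key j == key i) = same.length :=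
    List.countP_eq_length.mpr (fun j hj => by simp [hsamekey j hj])
  have hcnt0 : rest'.countP (fun j => key j == key i) = 0 :=
    List.countP_eq_zero.mpr (fun j hj => by simp [(hlt j hj).ne'])
  have hcnt_i : (i :: rest).countP (fun j => key j == key i) = 1 + same.length := by
    rw [← hsplit, List.countP_cons, List.countP_append, hcnt_same, hcnt0]
    simp [Nat.add_comm]
  have hcnt_r : ∀ j' ∈ rest',
      (i :: rest).countP (fun j => key j == key j')
        = rest'.countP (fun j => key j == key j') := by
    intro j' hj'
    rw [← hsplit, List.countP_cons, List.countP_append]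
    have h1 : (key i == key j') = false := by simp [(hlt j' hj').ne]
    have h2 : same.countP (fun j => key j == key j') = 0 :=
      List.countP_eq_zero.mpr (fun j hj => by
        have := hsamekey j hj
        simp [this, (hlt j' hj').ne])
    simp [h1, h2]
  set P : Int → Bool :=
    fun i' => (i :: rest).countP (fun j => key j == key i') == 1 with hP
  have hfilter_rest' : rest'.filter P
        = rest'.filter (fun i' => rest'.countP (fun j => key j == key i') == 1) :=
    List.filter_congr (fun j' hj' => by rw [hP]; simp only []; rw [hcnt_r j' hj'])
  have hfilter_same : same.filter P = [] := by
    rw [List.filter_eq_nil_iff]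
    intro j' hj'
    have hk : key j' = key i := hsamekey j' hj'
    have hpe : (fun j => key j == key j') = (fun j => key j == key i) := by
      funext j; rw [hk]
    have hlen : same.length ≥ 1 := by
      cases hse : same with
      | nil => rw [hse] at hj'; cases hj'
      | cons a b => simp
    rw [hP]
    simp only [hpe, hcnt_i, beq_iff_eq]
    omega
  have hPi : P i = ((1 + same.length) == 1) := by
    rw [hP]; simp only [hcnt_i]
  have hLHS : (i :: rest).filter P
      = (if P i then [i] else []) ++ (same.filter P ++ rest'.filter P) := by
    conv_lhs => rw [← hsplit]
    rw [List.filter_cons, List.filter_append]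
    by_cases hPi2 : P i = true
    · simp [hPi2]
    · simp [hPi2]
  rw [hLHS, hfilter_same, hfilter_rest', List.nil_append]
  by_cases hse : same.isEmpty
  · have hc0 : same.length = 0 := by simpa [List.isEmpty_iff_length_eq_zero] using hse
    have : P i = true := by rw [hPi, hc0]; simp
    rw [this, if_pos hse]
    rfl
  · have : P i = false := by
      rw [hPi]
      have hc1 : same.length ≥ 1 := by
        rcases hse2 : same with _ | ⟨a, b⟩
        · rw [hse2] at hse; simp at hse
        · simp
      simp only [beq_eq_false_iff_ne, ne_eq]
      omega
    rw [this, if_neg hse]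
    rfl

-- the grouping scan over a key-sorted list keeps exactly the elements whose key is unique in it
theorem groupUniq_sorted (sigs : List String) :
    ∀ (l : List Int),
      l.Pairwise (fun a b => PySem.List.pyGetD sigs a "" ≤ PySem.List.pyGetD sigs b "") →
      groupUniq sigs l =
        l.filter (fun i => l.countP
          (fun j => PySem.List.pyGetD sigs j "" == PySem.List.pyGetD sigs i "") == 1) := by
  intro l
  induction l using groupUniq.induct sigs with
  | case1 => intro _; simp [groupUniq]
  | case2 i rest s rest' hemp ih =>
    intro hp
    have hpair' : rest'.Pairwise
        (fun a b => PySem.List.pyGetD sigs a "" ≤ PySem.List.pyGetD sigs b "") :=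
      List.Pairwise.sublist (List.dropWhile_sublist _) hp.tail
    rw [filter_uniq_cons (fun j => PySem.List.pyGetD sigs j "") i rest hp, if_pos hemp,
      ← ih hpair']
    have hemp' : (rest.takeWhile (fun j =>
        PySem.List.pyGetD sigs j "" == PySem.List.pyGetD sigs i "")).isEmpty = true := hemp
    simp only [groupUniq, hemp', if_true]
    rfl
  | case3 i rest s rest' hemp ih =>
    intro hp
    have hpair' : rest'.Pairwise
        (fun a b => PySem.List.pyGetD sigs a "" ≤ PySem.List.pyGetD sigs b "") :=
      List.Pairwise.sublist (List.dropWhile_sublist _) hp.tail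
    rw [filter_uniq_cons (fun j => PySem.List.pyGetD sigs j "") i rest hp, if_neg hemp,
      ← ih hpair']
    have hemp' : (rest.takeWhile (fun j =>
        PySem.List.pyGetD sigs j "" == PySem.List.pyGetD sigs i "")).isEmpty = false := by
      simpa using hemp
    simp only [groupUniq, hemp']
    rfl

-- B computes the word at the first index whose signature is unique
theorem oddString_alt_eq_firstUniq (words : List String) :
    oddString_alt words = pvFirstUniq words := by
  unfold oddString_alt pvFirstUniq
  simp only []
  set sigs := words.map pySig with hsigs
  set key : Int → String := fun j => PySem.List.pyGetD sigs j "" with hkey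
  set rng := PySem.List.pyRange 0 (sigs.length : Int) 1 with hrng
  set ord := PySem.List.sorted rng key false with hord
  have hperm : ord.Perm rng := PySem.List.sorted_perm rng key false
  have hsortedp : ord.Pairwise (fun a b => key a ≤ key b) :=
    PySem.List.sorted_pairwise rng key
  have hmap : rng.map key = sigs := PySem.List.map_pyGetD_pyRange_zero' sigs ""
  have hcount : ∀ i : Int, rng.countP (fun j => key j == key i) = sigs.count (key i) := by
    intro i
    have h1 : (fun j => key j == key i) = ((fun s => s == key i) ∘ key) := rfl
    rw [h1, ← List.countP_map, hmap, List.count]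
  have hcount_ord : ∀ i : Int, ord.countP (fun j => key j == key i) = sigs.count (key i) := by
    intro i
    rw [hperm.countP_eq, hcount]
  have huniq : groupUniq sigs ord
      = ord.filter (fun i => sigs.count (key i) == 1) := by
    rw [groupUniq_sorted sigs ord hsortedp]
    exact List.filter_congr (fun i _ => by rw [hcount_ord i])
  set q : Int → Bool := fun i => sigs.count (key i) == 1 with hq
  have hpermf : (ord.filter q).Perm (rng.filter q) := hperm.filter q
  have hrhs :
      ((PySem.List.enumerate sigs).find? (fun p => sigs.count p.2 == 1)).elim ""
        (fun p => (PySem.List.pyGet? words p.1).getD "")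
      = ((rng.filter q).head?).elim "" (fun i => (PySem.List.pyGet? words i).getD "") := by
    rw [PySem.List.enumerate_eq_map_pyRange (d := ""), List.find?_map, List.head?_filter]
    simp only [PySem.List.len_eq]
    rw [← hrng]
    have hpf : ((fun p : Int × String => sigs.count p.2 == 1) ∘
        (fun j => (j, PySem.List.pyGetD sigs j ""))) = q := by
      funext j; rfl
    rw [hpf]
    cases rng.find? q with
    | none => rfl
    | some j => rfl
  rw [huniq, hrhs]
  cases hbase : rng.filter q with
  | nil =>
    have hn : ord.filter q = [] := List.Perm.eq_nil (hbase ▸ hpermf)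
    rw [hn]
    rfl
  | cons i0 t =>
    have hne : ord.filter q ≠ [] := by
      intro hc
      rw [hc] at hpermf
      have h2 := hpermf.symm.eq_nil
      rw [hbase] at h2
      cases h2
    obtain ⟨m, hm⟩ : ∃ m, PySem.List.min? (ord.filter q) (fun i => i) = some m := by
      cases hmin : PySem.List.min? (ord.filter q) (fun i => i) with
      | none => exact absurd ((PySem.List.min?_eq_none_iff _ _).mp hmin) hne
      | some m => exact ⟨m, rfl⟩
    have hmmem : m ∈ ord.filter q := PySem.List.min?_mem hm
    have hminh : ∀ y ∈ ord.filter q, m ≤ y := PySem.List.min?_isMin hm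
    have hi0mem : i0 ∈ ord.filter q :=
      hpermf.symm.mem_iff.mp (by rw [hbase]; exact List.mem_cons_self)
    have hple : (rng.filter q).Pairwise (· < ·) :=
      List.Pairwise.filter q (PySem.List.pairwise_lt_pyRange_one 0 _)
    have hi0le : ∀ y ∈ rng.filter q, i0 ≤ y := by
      intro y hy
      rw [hbase] at hy
      rcases List.mem_cons.mp hy with h1 | h1
      · exact le_of_eq h1.symm
      · exact le_of_lt (List.rel_of_pairwise_cons (hbase ▸ hple) h1)
    have hmeq : m = i0 := by
      have h1 : m ≤ i0 := hminh i0 hi0mem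
      have h2 : i0 ≤ m := hi0le m (hpermf.mem_iff.mp hmmem)
      omega
    rw [hm, hmeq]
    rfl

-- ===== VERDICT (by name: the statement is the Claim_ definition above) =====
theorem oddString_spec : Claim_equal_oddString := by
  intro words _ _
  unfold Spec_oddString
  rw [oddString_eq_firstUniq, oddString_alt_eq_firstUniq]
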